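-- pv_equiv track=rewrite | github.com/alimohammadiamirhossein/cminus | x.py | pol_two
-- ===== SOURCE A (Python) =====
-- def pol_two(x2, y2):
--     s2 = [[0, 0, 0], [0, 0, 0], [0, 0, 0]]
--     d2 = [[0], [0], [0]]
--     for i in range(len(x2)):
--         s2[0][0] += 1
--         s2[0][1] += x2[i]
--         s2[0][2] += x2[i] ** 2
--         s2[1][0] += x2[i]
--         s2[1][1] += x2[i] ** 2
--         s2[1][2] += x2[i] ** 3
--         s2[2][0] += x2[i] ** 2
--         s2[2][1] += x2[i] ** 3
--         s2[2][2] += x2[i] ** 4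
--         d2[0][0] += y2[i]
--         d2[1][0] += y2[i] * x2[i]
--         d2[2][0] += y2[i] * x2[i] * x2[i]
--     return s2, d2
-- ===== SOURCE B (Python) =====
-- def pol_two(x2, y2):
--     def moment(k):
--         return sum(x ** k for x in x2)
--
--     def wmoment(k):
--         return sum(y2[i] * x2[i] ** k for i in range(len(x2)))
--
--     s2 = [[moment(r + c) for c in range(3)] for r in range(3)]
--     d2 = [[wmoment(r)] for r in range(3)]
--     return s2, d2
-- ===== Notes on version B (the rewrite author's own statement) =====
-- stated objective: simpler
-- what changed: B defines the matrix entry (r,c) as the (r+c)-th power moment and the column entry r as the r-th weighted moment, and builds both matrices by nested comprehensions from those moment functions (12 staged summations), instead of A's single pass that mutates nine matrix cells and three column cells per iteration.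
import Mathlib
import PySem

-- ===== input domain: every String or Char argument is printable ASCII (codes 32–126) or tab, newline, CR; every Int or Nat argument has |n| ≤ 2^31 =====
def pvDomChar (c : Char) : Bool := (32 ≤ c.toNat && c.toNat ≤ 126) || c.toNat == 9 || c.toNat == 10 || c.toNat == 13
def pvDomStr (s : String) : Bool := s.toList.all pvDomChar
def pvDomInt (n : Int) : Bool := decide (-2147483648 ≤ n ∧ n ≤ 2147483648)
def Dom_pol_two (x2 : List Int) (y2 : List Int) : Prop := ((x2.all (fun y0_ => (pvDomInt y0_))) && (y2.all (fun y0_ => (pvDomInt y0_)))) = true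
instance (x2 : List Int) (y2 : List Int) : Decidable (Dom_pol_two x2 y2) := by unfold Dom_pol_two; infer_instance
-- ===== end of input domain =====

-- B builds each normal-equation entry from moment functions (entry (r,c) = (r+c)-th power
-- moment, column r = r-th weighted moment) via nested comprehensions — 12 staged
-- summations — instead of A's single pass mutating twelve cells (objective: simpler).

-- ===== PORT A =====
-- A's mutable 3x3 matrix s2 and 3x1 column d2 are carried as a 12-tuple of their cells,
-- updated in A's order each iteration; under Pre_ (len(y2) ≥ len(x2)) every x2[i]/y2[i]
-- of the loop is in range, so getD i 0 is exact there.
def pvStepA (x2 : List Int) (y2 : List Int)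
    (s : Int×Int×Int×Int×Int×Int×Int×Int×Int×Int×Int×Int) (i : Nat) :
    Int×Int×Int×Int×Int×Int×Int×Int×Int×Int×Int×Int :=
  match s with
  | (a00,a01,a02,a10,a11,a12,a20,a21,a22,d0,d1,d2) =>
    let xi := x2.getD i 0
    let yi := y2.getD i 0
    (a00+1, a01+xi, a02+xi^2, a10+xi, a11+xi^2, a12+xi^3,
     a20+xi^2, a21+xi^3, a22+xi^4, d0+yi, d1+yi*xi, d2+yi*xi*xi)

def pol_two (x2 : List Int) (y2 : List Int) : List (List Int) × List (List Int) :=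
  match (List.range x2.length).foldl (pvStepA x2 y2) (0,0,0,0,0,0,0,0,0,0,0,0) with
  | (a00,a01,a02,a10,a11,a12,a20,a21,a22,d0,d1,d2) =>
    ([[a00,a01,a02],[a10,a11,a12],[a20,a21,a22]], [[d0],[d1],[d2]])

-- ===== PORT B =====
-- moment(k) = sum(x ** k for x in x2): a left fold over x2, as Python's sum is.
def pvMoment (x2 : List Int) (k : Nat) : Int :=
  x2.foldl (fun a x => a + x ^ k) 0

-- wmoment(k) = sum(y2[i] * x2[i] ** k for i in range(len(x2)))
def pvWMoment (x2 : List Int) (y2 : List Int) (k : Nat) : Int :=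
  (List.range x2.length).foldl (fun a i => a + y2.getD i 0 * (x2.getD i 0) ^ k) 0

def pol_two_alt (x2 : List Int) (y2 : List Int) : List (List Int) × List (List Int) :=
  ((List.range 3).map (fun r => (List.range 3).map (fun c => pvMoment x2 (r + c))),
   (List.range 3).map (fun r => [pvWMoment x2 y2 r]))

-- ===== PRECONDITION & SPEC =====
-- Pre_ excludes len(x2) > len(y2): there both A and B raise IndexError on y2[i].
def Pre_pol_two (x2 : List Int) (y2 : List Int) : Prop := x2.length ≤ y2.length
instance (x2 : List Int) (y2 : List Int) : Decidable (Pre_pol_two x2 y2) := by unfold Pre_pol_two; infer_instance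
def pvWitness_pol_two : List Int × List Int := ([1, -2, 3], [4, 5, 6])

def Spec_pol_two (x2 : List Int) (y2 : List Int) (out : List (List Int) × List (List Int)) : Prop := out = pol_two_alt x2 y2
instance (x2 : List Int) (y2 : List Int) (out : List (List Int) × List (List Int)) : Decidable (Spec_pol_two x2 y2 out) := by unfold Spec_pol_two; infer_instance

-- ===== CLAIM (what is proved, stated in full; the proofs are below) =====
def Claim_equal_pol_two : Prop := ∀ (x2 : List Int) (y2 : List Int), Dom_pol_two x2 y2 → Pre_pol_two x2 y2 → Spec_pol_two x2 y2 (pol_two x2 y2)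

-- ===== LEMMAS AND PROOFS =====

-- a fold that only adds f of each element equals the initial value plus the sum of the map
theorem foldl_add_map {α : Type} (f : α → Int) :
    ∀ (l : List α) (c : Int), l.foldl (fun a x => a + f x) c = c + (l.map f).sum := by
  intro l
  induction l with
  | nil => intro c; simp
  | cons x l ih => intro c; simp [List.foldl_cons, ih]; ring

-- indexing over range(len) is the same as iterating the list
theorem range_map_getD (x2 : List Int) (f : Int → Int) :
    (List.range x2.length).map (fun i => f (x2.getD i 0)) = x2.map f := by
  apply List.ext_getElem
  · simp
  · intro i h1 h2
    simp [List.getD_eq_getElem?_getD, List.getElem?_eq_getElem (by simpa using h1)]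

-- A's twelve-cell fold splits into twelve independent moment sums
theorem foldA_split (x2 y2 : List Int) :
    ∀ (l : List Nat) (a00 a01 a02 a10 a11 a12 a20 a21 a22 d0 d1 d2 : Int),
    l.foldl (pvStepA x2 y2) (a00,a01,a02,a10,a11,a12,a20,a21,a22,d0,d1,d2) =
      (a00 + (l.map (fun i => (x2.getD i 0) ^ (0:Nat))).sum,
       a01 + (l.map (fun i => (x2.getD i 0) ^ (1:Nat))).sum,
       a02 + (l.map (fun i => (x2.getD i 0) ^ (2:Nat))).sum,
       a10 + (l.map (fun i => (x2.getD i 0) ^ (1:Nat))).sum,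
       a11 + (l.map (fun i => (x2.getD i 0) ^ (2:Nat))).sum,
       a12 + (l.map (fun i => (x2.getD i 0) ^ (3:Nat))).sum,
       a20 + (l.map (fun i => (x2.getD i 0) ^ (2:Nat))).sum,
       a21 + (l.map (fun i => (x2.getD i 0) ^ (3:Nat))).sum,
       a22 + (l.map (fun i => (x2.getD i 0) ^ (4:Nat))).sum,
       d0 + (l.map (fun i => y2.getD i 0 * (x2.getD i 0) ^ (0:Nat))).sum,
       d1 + (l.map (fun i => y2.getD i 0 * (x2.getD i 0) ^ (1:Nat))).sum,
       d2 + (l.map (fun i => y2.getD i 0 * (x2.getD i 0) ^ (2:Nat))).sum) := by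
  intro l
  induction l with
  | nil => intro _ _ _ _ _ _ _ _ _ _ _ _; simp
  | cons i l ih =>
    intro a00 a01 a02 a10 a11 a12 a20 a21 a22 d0 d1 d2
    simp only [List.foldl_cons, pvStepA, List.map_cons, List.sum_cons, ih, Prod.mk.injEq]
    refine ⟨?_,?_,?_,?_,?_,?_,?_,?_,?_,?_,?_,?_⟩ <;> ring

theorem pvMoment_eq (x2 : List Int) (k : Nat) :
    pvMoment x2 k = ((List.range x2.length).map (fun i => (x2.getD i 0) ^ k)).sum := by
  rw [pvMoment, foldl_add_map, ← range_map_getD x2 (fun x => x ^ k), zero_add]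

theorem pvWMoment_eq (x2 y2 : List Int) (k : Nat) :
    pvWMoment x2 y2 k =
      ((List.range x2.length).map (fun i => y2.getD i 0 * (x2.getD i 0) ^ k)).sum := by
  simp [pvWMoment, foldl_add_map]

-- ===== VERDICT (by name: the statement is the Claim_ definition above) =====
theorem pol_two_spec : Claim_equal_pol_two := by
  intro x2 y2 _ _
  show pol_two x2 y2 = pol_two_alt x2 y2
  simp only [pol_two, foldA_split, zero_add]
  simp [pol_two_alt, List.range_succ, pvMoment_eq, pvWMoment_eq]
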